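-- pv_equiv track=rewrite | github.com/mallikaag01/word-game | reductions.py | reduceOne
-- ===== SOURCE A (Python) =====
-- def reduceOne(firstString, secondString, wordlist):
--     if secondString not in wordlist:
--         return False
--     if firstString not in wordlist:
--         return False
--
--     wordset = set(wordlist)
--     for i in range(len(firstString)):
--         for j in range(i + 1, len(firstString) + 1):
--             substring = firstString[i:j]
--             if substring in wordset and firstString[:i] + firstString[j:] == secondString:
--                 return True
--     return False
-- ===== SOURCE B (Python) =====
-- def _lcp(a, b):
--     i = 0
--     while i < len(a) and i < len(b) and a[i] == b[i]:
--         i += 1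
--     return i
--
--
-- def reduceOne(firstString, secondString, wordlist):
--     if secondString not in wordlist or firstString not in wordlist:
--         return False
--     k = len(firstString) - len(secondString)
--     if k <= 0:
--         return False
--     wordset = set(wordlist)
--     p = _lcp(firstString, secondString)
--     s = _lcp(firstString[::-1], secondString[::-1])
--     m = len(secondString)
--     for i in range(max(0, m - s), min(p, m) + 1):
--         if firstString[i:i + k] in wordset:
--             return True
--     return False
-- ===== Notes on version B (the rewrite author's own statement) =====
-- stated objective: alternative
-- what changed: Instead of scanning all removal windows (i,j) and rebuilding/comparing the remainder string for each, B computes the lengths of the longest common prefix and suffix of the two strings once, which pins the removal window to the single length k = len(first)-len(second) and a contiguous band of valid start positions, and only checks those candidate substrings against the word set.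
import Mathlib
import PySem

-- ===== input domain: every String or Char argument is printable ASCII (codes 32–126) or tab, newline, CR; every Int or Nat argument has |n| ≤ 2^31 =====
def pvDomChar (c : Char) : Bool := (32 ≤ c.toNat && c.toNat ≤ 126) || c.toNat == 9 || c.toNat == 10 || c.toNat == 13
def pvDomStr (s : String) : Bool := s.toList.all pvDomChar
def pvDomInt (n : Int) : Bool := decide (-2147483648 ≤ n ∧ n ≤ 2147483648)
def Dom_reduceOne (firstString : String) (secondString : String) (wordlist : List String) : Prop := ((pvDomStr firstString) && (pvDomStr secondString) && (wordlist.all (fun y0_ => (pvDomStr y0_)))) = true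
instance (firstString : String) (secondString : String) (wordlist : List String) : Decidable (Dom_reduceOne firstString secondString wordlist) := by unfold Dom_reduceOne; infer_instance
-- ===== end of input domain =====

-- B replaces A's scan over all (i,j) removal windows by a common-prefix/suffix
-- computation that pins the removal window to a single length and a band of start
-- positions (objective: alternative algorithm).


-- ===== PORT A =====
def reduceOne (firstString : String) (secondString : String) (wordlist : List String) : Bool :=
  if !(wordlist.contains secondString) then false
  else if !(wordlist.contains firstString) then false
  else
    let wordset := PySem.Set.ofList wordlist
    let fl := firstString.toList
    (PySem.List.pyRange 0 (fl.length : Int) 1).any (fun i =>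
      (PySem.List.pyRange (i + 1) ((fl.length : Int) + 1) 1).any (fun j =>
        let substring := PySem.List.slice fl (some i) (some j)
        wordset.contains (String.ofList substring) &&
          (PySem.List.slice fl none (some i) ++ PySem.List.slice fl (some j) none
            == secondString.toList)))

-- ===== PORT B =====
-- Source B's _lcp (a while loop advancing while the heads agree), as structural recursion
def pvLcp : List Char → List Char → Nat
  | a :: as, b :: bs => if a = b then pvLcp as bs + 1 else 0
  | _, _ => 0

def reduceOne_alt (firstString : String) (secondString : String) (wordlist : List String) : Bool :=
  if !(wordlist.contains secondString) || !(wordlist.contains firstString) then false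
  else
    let fl := firstString.toList
    let sl := secondString.toList
    let k : Int := (fl.length : Int) - (sl.length : Int)
    if k ≤ 0 then false
    else
      let wordset := PySem.Set.ofList wordlist
      let p := pvLcp fl sl
      let s := pvLcp fl.reverse sl.reverse   -- Source B: _lcp(first[::-1], second[::-1])
      let m := sl.length
      (PySem.List.pyRange (max 0 ((m : Int) - (s : Int))) (min (p : Int) (m : Int) + 1) 1).any
        (fun i => wordset.contains (String.ofList (PySem.List.slice fl (some i) (some (i + k)))))

-- ===== PRECONDITION & SPEC =====
def Spec_reduceOne (firstString : String) (secondString : String) (wordlist : List String) (out : Bool) : Prop := out = reduceOne_alt firstString secondString wordlist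
instance (firstString : String) (secondString : String) (wordlist : List String) (out : Bool) : Decidable (Spec_reduceOne firstString secondString wordlist out) := by unfold Spec_reduceOne; infer_instance

-- ===== CLAIM (what is proved, stated in full; the proofs are below) =====
def Claim_equal_reduceOne : Prop := ∀ (firstString : String) (secondString : String) (wordlist : List String), Dom_reduceOne firstString secondString wordlist → Spec_reduceOne firstString secondString wordlist (reduceOne firstString secondString wordlist)

-- ===== LEMMAS AND PROOFS =====

theorem pvLcp_nil_left (b : List Char) : pvLcp [] b = 0 := by cases b <;> rfl

theorem pvLcp_nil_right (a : List Char) : pvLcp a [] = 0 := by cases a <;> rfl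

theorem pvLcp_cons_cons (x y : Char) (xs ys : List Char) :
    pvLcp (x :: xs) (y :: ys) = if x = y then pvLcp xs ys + 1 else 0 := rfl

theorem pvLcp_le_left (a b : List Char) : pvLcp a b ≤ a.length := by
  induction a generalizing b with
  | nil => simp [pvLcp_nil_left]
  | cons x xs ih =>
    cases b with
    | nil => simp [pvLcp_nil_right]
    | cons y ys =>
      rw [pvLcp_cons_cons]
      split_ifs
      · simpa using ih ys
      · simp

theorem pvLcp_le_right (a b : List Char) : pvLcp a b ≤ b.length := by
  induction a generalizing b with
  | nil => simp [pvLcp_nil_left]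
  | cons x xs ih =>
    cases b with
    | nil => simp [pvLcp_nil_right]
    | cons y ys =>
      rw [pvLcp_cons_cons]
      split_ifs
      · simpa using ih ys
      · simp

theorem take_eq_of_le_pvLcp (a b : List Char) (t : Nat) (h : t ≤ pvLcp a b) :
    a.take t = b.take t := by
  induction a generalizing b t with
  | nil =>
    rw [pvLcp_nil_left] at h
    have : t = 0 := by omega
    simp [this]
  | cons x xs ih =>
    cases b with
    | nil =>
      rw [pvLcp_nil_right] at h
      have : t = 0 := by omega
      simp [this]
    | cons y ys =>
      cases t with
      | zero => simp
      | succ t' =>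
        rw [pvLcp_cons_cons] at h
        by_cases hxy : x = y
        · subst hxy
          rw [if_pos rfl] at h
          simp [List.take_succ_cons, ih ys t' (by omega)]
        · rw [if_neg hxy] at h; omega

theorem le_pvLcp_of_take_eq (a b : List Char) (t : Nat) (ha : t ≤ a.length)
    (hb : t ≤ b.length) (h : a.take t = b.take t) : t ≤ pvLcp a b := by
  induction a generalizing b t with
  | nil => simp only [List.length_nil] at ha; omega
  | cons x xs ih =>
    cases b with
    | nil => simp only [List.length_nil] at hb; omega
    | cons y ys =>
      cases t with
      | zero => omega
      | succ t' =>
        simp only [List.take_succ_cons, List.cons.injEq] at h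
        obtain ⟨hxy, htl⟩ := h
        subst hxy
        rw [pvLcp_cons_cons, if_pos rfl]
        have := ih ys t' (by simpa using ha) (by simpa using hb) htl
        omega

-- suffix form: agreement of the last t characters, via reverse
theorem drop_eq_of_le_pvLcp_rev (a b : List Char) (t : Nat)
    (h : t ≤ pvLcp a.reverse b.reverse) :
    a.drop (a.length - t) = b.drop (b.length - t) := by
  have := take_eq_of_le_pvLcp a.reverse b.reverse t h
  have ha : a.reverse.take t = (a.drop (a.length - t)).reverse := List.take_reverse
  have hb : b.reverse.take t = (b.drop (b.length - t)).reverse := List.take_reverse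
  rw [ha, hb] at this
  exact List.reverse_injective this

theorem le_pvLcp_rev_of_drop_eq (a b : List Char) (t : Nat) (ha : t ≤ a.length)
    (hb : t ≤ b.length) (h : a.drop (a.length - t) = b.drop (b.length - t)) :
    t ≤ pvLcp a.reverse b.reverse := by
  apply le_pvLcp_of_take_eq _ _ t (by simpa) (by simpa)
  rw [(List.take_reverse : a.reverse.take t = _),
      (List.take_reverse : b.reverse.take t = _), h]

-- A's inner double loop finds a witness iff B's banded single loop does
theorem core_loops (q : List Char → Bool) (fl sl : List Char) :
    ((PySem.List.pyRange 0 (fl.length : Int) 1).any (fun i =>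
      (PySem.List.pyRange (i + 1) ((fl.length : Int) + 1) 1).any (fun j =>
        q (PySem.List.slice fl (some i) (some j)) &&
          (PySem.List.slice fl none (some i) ++ PySem.List.slice fl (some j) none
            == sl))))
    =
    (if (fl.length : Int) - (sl.length : Int) ≤ 0 then false
     else (PySem.List.pyRange
            (max 0 ((sl.length : Int) - (pvLcp fl.reverse sl.reverse : Int)))
            (min (pvLcp fl sl : Int) (sl.length : Int) + 1) 1).any
        (fun i => q (PySem.List.slice fl (some i)
            (some (i + ((fl.length : Int) - (sl.length : Int))))))) := by
  have hp := pvLcp_le_left fl sl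
  have hp2 := pvLcp_le_right fl sl
  have hs1 : pvLcp fl.reverse sl.reverse ≤ fl.length := by
    simpa using pvLcp_le_left fl.reverse sl.reverse
  have hs2 : pvLcp fl.reverse sl.reverse ≤ sl.length := by
    simpa using pvLcp_le_right fl.reverse sl.reverse
  set n := fl.length with hn
  set m := sl.length with hm
  set p := pvLcp fl sl with hpdef
  set s := pvLcp fl.reverse sl.reverse with hsdef
  rw [Bool.eq_iff_iff]
  simp only [List.any_eq_true, PySem.List.mem_pyRange_one, Bool.and_eq_true, beq_iff_eq]
  constructor
  · rintro ⟨i, ⟨hi0, hin⟩, j, ⟨hji, hjn⟩, hq, heq⟩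
    have hj0 : 0 ≤ j := by omega
    rw [PySem.List.slice_toNat fl hi0 (by omega)] at hq
    rw [PySem.List.slice_to fl hi0, PySem.List.slice_from fl hj0] at heq
    set i' := i.toNat with hi'
    set j' := j.toNat with hj'
    have hii : (i : Int) = i' := by omega
    have hjj : (j : Int) = j' := by omega
    have hi'n : i' < n := by omega
    have hj'n : j' ≤ n := by omega
    have hij' : i' < j' := by omega
    have hlt : (fl.take i').length = i' := by simp; omega
    have hlen : i' + (n - j') = m := by
      have := congrArg List.length heq
      simp at this
      omega
    have hmn : m < n := by omega
    have htake : fl.take i' = sl.take i' := by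
      rw [← heq, List.take_left' hlt]
    have hdrop : fl.drop j' = sl.drop i' := by
      rw [← heq, List.drop_left' hlt]
    have hip : i' ≤ p := le_pvLcp_of_take_eq fl sl i' (by omega) (by omega) htake
    have hts : m - i' ≤ s := by
      apply le_pvLcp_rev_of_drop_eq fl sl (m - i') (by omega) (by omega)
      have h1 : n - (m - i') = j' := by omega
      have h2 : m - (m - i') = i' := by omega
      rw [h1, h2]; exact hdrop
    rw [if_neg (by omega)]
    apply List.any_eq_true.mpr
    refine ⟨i, PySem.List.mem_pyRange_one.mpr ⟨by omega, by omega⟩, ?_⟩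
    rw [PySem.List.slice_toNat fl hi0 (by omega)]
    have hw : (i + ((n : Int) - (m : Int))).toNat - i' = j' - i' := by omega
    rw [hw]
    exact hq
  · intro h
    by_cases hk : (n : Int) - (m : Int) ≤ 0
    · rw [if_pos hk] at h; simp at h
    · rw [if_neg hk] at h
      obtain ⟨i, hmem, hq⟩ := List.any_eq_true.mp h
      obtain ⟨hlo, hhi⟩ := PySem.List.mem_pyRange_one.mp hmem
      have hi0 : 0 ≤ i := le_trans (le_max_left 0 _) hlo
      set i' := i.toNat with hi'
      have hii : (i : Int) = i' := by omega
      have hmn : m < n := by omega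
      have hip : i' ≤ p := by omega
      have him : i' ≤ m := by omega
      have hms : m - i' ≤ s := by omega
      refine ⟨i, ⟨hi0, by omega⟩, i + ((n : Int) - (m : Int)), ⟨by omega, by omega⟩, ?_, ?_⟩
      · rw [PySem.List.slice_toNat fl hi0 (by omega)] at hq ⊢
        exact hq
      · rw [PySem.List.slice_to fl hi0, PySem.List.slice_from fl (by omega)]
        have htake : fl.take i' = sl.take i' := take_eq_of_le_pvLcp fl sl i' (by omega)
        have hdrop : fl.drop (i' + (n - m)) = sl.drop i' := by
          have h1 : n - (m - i') = i' + (n - m) := by omega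
          have h2 : m - (m - i') = i' := by omega
          have hd := drop_eq_of_le_pvLcp_rev fl sl (m - i') (by omega)
          rw [h1, h2] at hd
          exact hd
        have hjn : (i + ((n : Int) - (m : Int))).toNat = i' + (n - m) := by omega
        rw [hjn, htake, hdrop, List.take_append_drop]


theorem reduceOne_spec_aux (firstString secondString : String) (wordlist : List String) :
    reduceOne firstString secondString wordlist
      = reduceOne_alt firstString secondString wordlist := by
  unfold reduceOne reduceOne_alt
  cases hs : wordlist.contains secondString with
  | false => simp
  | true =>
    cases hf : wordlist.contains firstString with
    | false => simp
    | true =>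
      simp only [Bool.not_true, Bool.false_eq_true, if_false]
      exact core_loops (fun sub => (PySem.Set.ofList wordlist).contains (String.ofList sub))
        firstString.toList secondString.toList

-- ===== VERDICT (by name: the statement is the Claim_ definition above) =====
theorem reduceOne_spec : Claim_equal_reduceOne := by
  intro f s wl _
  unfold Spec_reduceOne
  exact reduceOne_spec_aux f s wl
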